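-- pv_equiv track=rewrite | github.com/chooron/dmg-research | project/bettermodel/parameters/plot_multibasin_parameter_variability.py | _resolve_panel_parameters
-- ===== SOURCE A (Python) =====
-- from typing import Any
--
-- PREFERRED_PARAMETERS = ("parBETA", "parFC", "parK0")
--
-- def _resolve_panel_parameters(loaded: dict[str, dict[str, Any]]) -> list[str]:
--     available: list[str] = []
--     for payload in loaded.values():
--         for name in payload["parameter_names"]:
--             if name not in available:
--                 available.append(name)
--
--     selected = [name for name in PREFERRED_PARAMETERS if name in available]
--     for name in available:
--         if name not in selected:
--             selected.append(name)
--         if len(selected) == 3: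
--             break
--     return selected[:3]
-- ===== SOURCE B (Python) =====
-- from typing import Any
--
-- PREFERRED_PARAMETERS = ("parBETA", "parFC", "parK0")
--
-- def _resolve_panel_parameters(loaded: dict[str, dict[str, Any]]) -> list[str]:
--     names = [name for payload in loaded.values() for name in payload["parameter_names"]]
--     available = list(dict.fromkeys(names))
--     def priority(name: str) -> int:
--         if name in PREFERRED_PARAMETERS:
--             return PREFERRED_PARAMETERS.index(name)
--         return len(PREFERRED_PARAMETERS)
--     return sorted(available, key=priority)[:3]
-- ===== Notes on version B (the rewrite author's own statement) =====
-- stated objective: simpler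
-- what changed: Replaces A's two-phase selection (preferred-first comprehension followed by a stateful fill loop with an early break at length 3) by one stable sort of the deduplicated names under a priority key plus a slice [:3].
-- outside the precondition, e.g. on _resolve_panel_parameters({'b': {'other': ['x']}}): A raises KeyError, B raises KeyError
import Mathlib
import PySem

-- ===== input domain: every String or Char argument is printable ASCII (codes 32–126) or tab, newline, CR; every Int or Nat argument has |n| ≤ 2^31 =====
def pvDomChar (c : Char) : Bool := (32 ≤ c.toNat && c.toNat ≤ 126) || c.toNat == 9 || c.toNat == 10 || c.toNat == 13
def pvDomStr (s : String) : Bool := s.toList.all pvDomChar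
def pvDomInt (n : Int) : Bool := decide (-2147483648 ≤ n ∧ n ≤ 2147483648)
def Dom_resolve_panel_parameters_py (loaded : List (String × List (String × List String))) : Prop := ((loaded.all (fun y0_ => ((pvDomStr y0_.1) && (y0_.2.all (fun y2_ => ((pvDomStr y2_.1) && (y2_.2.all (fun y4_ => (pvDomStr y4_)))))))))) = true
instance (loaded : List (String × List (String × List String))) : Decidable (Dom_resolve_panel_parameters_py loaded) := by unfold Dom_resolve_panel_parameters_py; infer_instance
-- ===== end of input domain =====

-- B replaces A's two-phase selection (preferred-first list plus a stateful fill loop with an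
-- early break) by one stable sort under a priority key plus a slice; objective: simpler.

-- module constant PREFERRED_PARAMETERS, shared by both Pythons
def pvPreferredParameters : List String := ["parBETA", "parFC", "parK0"]

-- ===== PORT A =====
-- the 'for name in available: … break' fill loop of A
def pvFill : List String → List String → List String
  | [], sel => sel
  | n :: rest, sel =>
      let sel' := if n ∈ sel then sel else sel ++ [n]
      if sel'.length = 3 then sel' else pvFill rest sel'

def resolve_panel_parameters_py (loaded : List (String × List (String × List String))) : List String :=
  let available := loaded.foldl (fun acc kv =>
    ((PySem.Dict.mk kv.2).getD "parameter_names" []).foldl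
      (fun a n => if n ∈ a then a else a ++ [n]) acc) []
  let selected := pvPreferredParameters.filter (fun n => decide (n ∈ available))
  (pvFill available selected).take 3

-- ===== PORT B =====
-- Source B's priority key: PREFERRED_PARAMETERS.index(name) if present, else len(PREFERRED_PARAMETERS)
def pvPriority (n : String) : Nat :=
  if n ∈ pvPreferredParameters then
    (PySem.List.index? pvPreferredParameters n).getD pvPreferredParameters.length
  else pvPreferredParameters.length

def resolve_panel_parameters_py_alt (loaded : List (String × List (String × List String))) : List String :=
  let names := loaded.flatMap (fun kv => (PySem.Dict.mk kv.2).getD "parameter_names" [])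
  let available := PySem.List.dedup names
  (PySem.List.sorted available pvPriority).take 3

-- ===== PRECONDITION & SPEC =====
-- Pre_ excludes association lists in which the outer dict or some payload dict has duplicate
-- keys (there the assoc-list encoding of a Python dict is ambiguous) and payloads without a
-- "parameter_names" key, on which A raises KeyError.
def Pre_resolve_panel_parameters_py (loaded : List (String × List (String × List String))) : Prop :=
  (loaded.map Prod.fst).Nodup ∧
  ∀ kv ∈ loaded, (kv.2.map Prod.fst).Nodup ∧ "parameter_names" ∈ kv.2.map Prod.fst
instance (loaded : List (String × List (String × List String))) : Decidable (Pre_resolve_panel_parameters_py loaded) := by unfold Pre_resolve_panel_parameters_py; infer_instance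

def pvWitness_resolve_panel_parameters_py : (List (String × List (String × List String))) :=
  [("basin01", [("parameter_names", ["parFC", "parX"])])]

def Spec_resolve_panel_parameters_py (loaded : List (String × List (String × List String))) (out : List String) : Prop := out = resolve_panel_parameters_py_alt loaded
instance (loaded : List (String × List (String × List String))) (out : List String) : Decidable (Spec_resolve_panel_parameters_py loaded out) := by unfold Spec_resolve_panel_parameters_py; infer_instance

-- ===== CLAIM (what is proved, stated in full; the proofs are below) =====
def Claim_equal_resolve_panel_parameters_py : Prop := ∀ (loaded : List (String × List (String × List String))), Dom_resolve_panel_parameters_py loaded → Pre_resolve_panel_parameters_py loaded → Spec_resolve_panel_parameters_py loaded (resolve_panel_parameters_py loaded)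

-- ===== LEMMAS AND PROOFS =====

-- A's dedup loop is dict.fromkeys (PySem.List.dedup)
theorem pvFoldl_step_eq_dedup (xs : List String) (acc : List String) :
    xs.foldl (fun a n => if n ∈ a then a else a ++ [n]) acc =
      xs.foldl PySem.Set.add acc := by
  induction xs generalizing acc with
  | nil => rfl
  | cons x xs ih =>
      have hc : PySem.Set.contains acc x = decide (x ∈ acc) := by
        simp [PySem.Set.contains, List.contains_eq_mem]
      simp only [List.foldl_cons, PySem.Set.add, hc, decide_eq_true_eq]
      rw [ih]

-- insertBy walks past a block it does not go before
theorem pvInsertBy_skip {α : Type} (before : α → α → Bool) (x : α) (l t : List α)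
    (h : ∀ b ∈ l, before x b = false) :
    PySem.List.insertBy before x (l ++ t) = l ++ PySem.List.insertBy before x t := by
  induction l with
  | nil => rfl
  | cons b l ih =>
      simp only [List.cons_append, PySem.List.insertBy, h b (by simp)]
      simp only [Bool.false_eq_true, if_false, List.cons.injEq, true_and]
      exact ih (fun b hb => h b (by simp [hb]))

-- insertBy stops in front of a block it goes before (or the empty tail)
theorem pvInsertBy_front {α : Type} (before : α → α → Bool) (x : α) (t : List α)
    (h : ∀ b ∈ t, before x b = true) :
    PySem.List.insertBy before x t = x :: t := by
  cases t with
  | nil => rfl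
  | cons b t => simp [PySem.List.insertBy, h b (by simp)]

-- stable insertion sort under a key bounded by 3 lays out the four key-buckets in order
theorem pvSorted_buckets (key : String → Nat) (hkey : ∀ n, key n ≤ 3) (xs : List String) :
    ∀ b0 b1 b2 b3 : List String,
    (∀ x ∈ b0, key x = 0) → (∀ x ∈ b1, key x = 1) → (∀ x ∈ b2, key x = 2) → (∀ x ∈ b3, key x = 3) →
    xs.foldl (fun acc x => PySem.List.insertBy (fun a b => decide (key a < key b)) x acc)
        (b0 ++ b1 ++ b2 ++ b3) =
      (b0 ++ xs.filter (fun n => decide (key n = 0))) ++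
      (b1 ++ xs.filter (fun n => decide (key n = 1))) ++
      (b2 ++ xs.filter (fun n => decide (key n = 2))) ++
      (b3 ++ xs.filter (fun n => decide (key n = 3))) := by
  induction xs with
  | nil => intro b0 b1 b2 b3 _ _ _ _; simp
  | cons x xs ih =>
      intro b0 b1 b2 b3 h0 h1 h2 h3
      have hx := hkey x
      have hcase : key x = 0 ∨ key x = 1 ∨ key x = 2 ∨ key x = 3 := by omega
      simp only [List.foldl_cons]
      rcases hcase with hk | hk | hk | hk
      · rw [show b0 ++ b1 ++ b2 ++ b3 = b0 ++ (b1 ++ b2 ++ b3) by simp,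
          pvInsertBy_skip _ _ _ _ (by intro b hb; simp [h0 b hb, hk]),
          pvInsertBy_front _ _ _ (by
            intro b hb; simp only [List.mem_append] at hb
            rcases hb with (hb | hb) | hb
            · simp [h1 b hb, hk]
            · simp [h2 b hb, hk]
            · simp [h3 b hb, hk])]
        rw [show b0 ++ (x :: (b1 ++ b2 ++ b3)) = (b0 ++ [x]) ++ b1 ++ b2 ++ b3 by simp]
        rw [ih (b0 ++ [x]) b1 b2 b3
          (by intro y hy; rcases List.mem_append.1 hy with hy | hy
              · exact h0 y hy
              · simp at hy; subst hy; exact hk) h1 h2 h3]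
        simp [hk]
      · rw [show b0 ++ b1 ++ b2 ++ b3 = (b0 ++ b1) ++ (b2 ++ b3) by simp,
          pvInsertBy_skip _ _ _ _ (by
            intro b hb
            rcases List.mem_append.1 hb with hb | hb
            · simp [h0 b hb, hk]
            · simp [h1 b hb, hk]),
          pvInsertBy_front _ _ _ (by
            intro b hb
            rcases List.mem_append.1 hb with hb | hb
            · simp [h2 b hb, hk]
            · simp [h3 b hb, hk])]
        rw [show (b0 ++ b1) ++ (x :: (b2 ++ b3)) = b0 ++ (b1 ++ [x]) ++ b2 ++ b3 by simp]
        rw [ih b0 (b1 ++ [x]) b2 b3 h0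
          (by intro y hy; rcases List.mem_append.1 hy with hy | hy
              · exact h1 y hy
              · simp at hy; subst hy; exact hk) h2 h3]
        simp [hk]
      · rw [show b0 ++ b1 ++ b2 ++ b3 = (b0 ++ b1 ++ b2) ++ b3 by simp,
          pvInsertBy_skip _ _ _ _ (by
            intro b hb; simp only [List.mem_append] at hb
            rcases hb with (hb | hb) | hb
            · simp [h0 b hb, hk]
            · simp [h1 b hb, hk]
            · simp [h2 b hb, hk]),
          pvInsertBy_front _ _ _ (by intro b hb; simp [h3 b hb, hk])]
        rw [show (b0 ++ b1 ++ b2) ++ (x :: b3) = b0 ++ b1 ++ (b2 ++ [x]) ++ b3 by simp]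
        rw [ih b0 b1 (b2 ++ [x]) b3 h0 h1
          (by intro y hy; rcases List.mem_append.1 hy with hy | hy
              · exact h2 y hy
              · simp at hy; subst hy; exact hk) h3]
        simp [hk]
      · rw [show b0 ++ b1 ++ b2 ++ b3 = (b0 ++ b1 ++ b2 ++ b3) ++ [] by simp,
          pvInsertBy_skip _ _ _ _ (by
            intro b hb; simp only [List.mem_append] at hb
            rcases hb with ((hb | hb) | hb) | hb
            · simp [h0 b hb, hk]
            · simp [h1 b hb, hk]
            · simp [h2 b hb, hk]
            · simp [h3 b hb, hk]),
          pvInsertBy_front _ _ _ (by intro b hb; simp at hb)]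
        rw [show (b0 ++ b1 ++ b2 ++ b3) ++ [x] = b0 ++ b1 ++ b2 ++ (b3 ++ [x]) by simp]
        rw [ih b0 b1 b2 (b3 ++ [x]) h0 h1 h2
          (by intro y hy; rcases List.mem_append.1 hy with hy | hy
              · exact h3 y hy
              · simp at hy; subst hy; exact hk)]
        simp [hk]

-- filtering a Nodup list for one value
theorem pvFilter_eq_single (av : List String) (a : String) (h : av.Nodup) :
    av.filter (fun b => decide (b = a)) = if a ∈ av then [a] else [] := by
  induction av with
  | nil => simp
  | cons x av ih =>
      rcases List.nodup_cons.1 h with ⟨hx, hnd⟩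
      by_cases hxa : x = a
      · subst hxa
        simp [ih hnd, hx]
      · simp [hxa, ih hnd, Ne.symm hxa]

-- A's fill loop, truncated at 3, is 'selected ++ the unselected names', truncated at 3
theorem pvFill_take (av : List String) (h : av.Nodup) :
    ∀ sel : List String,
    (pvFill av sel).take 3 = (sel ++ av.filter (fun n => decide (n ∉ sel))).take 3 := by
  induction av with
  | nil => intro sel; simp [pvFill]
  | cons n rest ih =>
      intro sel
      rcases List.nodup_cons.1 h with ⟨hn, hnd⟩
      by_cases hmem : n ∈ sel
      · simp only [pvFill, if_pos hmem]
        by_cases hlen : sel.length = 3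
        · rw [if_pos hlen, List.take_of_length_le (by omega), List.take_left' hlen]
        · rw [if_neg hlen, ih hnd sel]
          simp [hmem]
      · simp only [pvFill, if_neg hmem]
        by_cases hlen : (sel ++ [n]).length = 3
        · rw [if_pos hlen,
            show sel ++ (n :: rest).filter (fun n => decide (n ∉ sel)) =
              (sel ++ [n]) ++ rest.filter (fun n => decide (n ∉ sel)) by
                simp [hmem]]
          rw [List.take_of_length_le (by omega), List.take_left' hlen]
        · rw [if_neg hlen, ih hnd (sel ++ [n])]
          have hf : rest.filter (fun m => decide (m ∉ sel ++ [n])) =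
              rest.filter (fun m => decide (m ∉ sel)) := by
            apply List.filter_congr
            intro m hm
            have : m ≠ n := fun he => hn (he ▸ hm)
            simp [this]
          rw [hf]
          simp [hmem]

-- the priority key is bounded by 3
theorem pvPriority_le (n : String) : pvPriority n ≤ 3 := by
  unfold pvPriority pvPreferredParameters
  split
  · rename_i hmem
    fin_cases hmem <;> decide
  · decide

-- the key-buckets of pvPriority, read off on a Nodup list
theorem pvBucket0 (av : List String) (h : av.Nodup) :
    av.filter (fun n => decide (pvPriority n = 0)) = if "parBETA" ∈ av then ["parBETA"] else [] := by
  rw [show (fun n => decide (pvPriority n = 0)) = (fun n => decide (n = "parBETA")) by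
    funext n
    by_cases h0 : n = "parBETA"
    · subst h0; decide
    · by_cases h1 : n = "parFC"
      · subst h1; decide
      · by_cases h2 : n = "parK0"
        · subst h2; decide
        · simp [pvPriority, pvPreferredParameters, h0, h1, h2]]
  exact pvFilter_eq_single av _ h

theorem pvBucket1 (av : List String) (h : av.Nodup) :
    av.filter (fun n => decide (pvPriority n = 1)) = if "parFC" ∈ av then ["parFC"] else [] := by
  rw [show (fun n => decide (pvPriority n = 1)) = (fun n => decide (n = "parFC")) by
    funext n
    by_cases h0 : n = "parBETA"
    · subst h0; decide
    · by_cases h1 : n = "parFC"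
      · subst h1; decide
      · by_cases h2 : n = "parK0"
        · subst h2; decide
        · simp [pvPriority, pvPreferredParameters, h0, h1, h2]]
  exact pvFilter_eq_single av _ h

theorem pvBucket2 (av : List String) (h : av.Nodup) :
    av.filter (fun n => decide (pvPriority n = 2)) = if "parK0" ∈ av then ["parK0"] else [] := by
  rw [show (fun n => decide (pvPriority n = 2)) = (fun n => decide (n = "parK0")) by
    funext n
    by_cases h0 : n = "parBETA"
    · subst h0; decide
    · by_cases h1 : n = "parFC"
      · subst h1; decide
      · by_cases h2 : n = "parK0"
        · subst h2; decide
        · simp [pvPriority, pvPreferredParameters, h0, h1, h2]]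
  exact pvFilter_eq_single av _ h

theorem pvBucket3 (av : List String) :
    av.filter (fun n => decide (pvPriority n = 3)) =
      av.filter (fun n => decide (n ∉ pvPreferredParameters)) := by
  apply List.filter_congr
  intro n _
  by_cases h0 : n = "parBETA"
  · subst h0; decide
  · by_cases h1 : n = "parFC"
    · subst h1; decide
    · by_cases h2 : n = "parK0"
      · subst h2; decide
      · simp [pvPriority, pvPreferredParameters, h0, h1, h2]

-- the core identity, on any Nodup list of available names
theorem pvCore (av : List String) (h : av.Nodup) :
    (pvFill av (pvPreferredParameters.filter (fun n => decide (n ∈ av)))).take 3 =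
      (PySem.List.sorted av pvPriority).take 3 := by
  have hsorted : PySem.List.sorted av pvPriority =
      (av.filter (fun n => decide (pvPriority n = 0))) ++
      (av.filter (fun n => decide (pvPriority n = 1))) ++
      (av.filter (fun n => decide (pvPriority n = 2))) ++
      (av.filter (fun n => decide (pvPriority n = 3))) := by
    have := pvSorted_buckets pvPriority pvPriority_le av [] [] [] []
      (by simp) (by simp) (by simp) (by simp)
    simpa [PySem.List.sorted] using this
  set sel := pvPreferredParameters.filter (fun n => decide (n ∈ av)) with hsel
  have hselval : sel = (if "parBETA" ∈ av then ["parBETA"] else []) ++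
      (if "parFC" ∈ av then ["parFC"] else []) ++
      (if "parK0" ∈ av then ["parK0"] else []) := by
    rw [hsel]
    unfold pvPreferredParameters
    by_cases hB : "parBETA" ∈ av <;> by_cases hF : "parFC" ∈ av <;> by_cases hK : "parK0" ∈ av <;>
      simp [hB, hF, hK]
  have hlast : av.filter (fun n => decide (n ∉ sel)) =
      av.filter (fun n => decide (n ∉ pvPreferredParameters)) := by
    apply List.filter_congr
    intro n hn
    have : n ∈ sel ↔ n ∈ pvPreferredParameters := by
      rw [hsel]; simp [List.mem_filter, hn]
    simp [this]
  rw [pvFill_take av h sel, hlast, hsorted,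
    pvBucket0 av h, pvBucket1 av h, pvBucket2 av h, pvBucket3 av, hselval]

-- ===== VERDICT (by name: the statement is the Claim_ definition above) =====
theorem resolve_panel_parameters_py_spec : Claim_equal_resolve_panel_parameters_py := by
  intro loaded _ _
  unfold Spec_resolve_panel_parameters_py resolve_panel_parameters_py resolve_panel_parameters_py_alt
  rw [← List.foldl_flatMap, pvFoldl_step_eq_dedup]
  exact pvCore _ (PySem.List.nodup_dedup _)
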